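-- pv_equiv track=rewrite | github.com/gmatarbhog-cci/PythonTasks | TaskSet-I/T8-sentence-value.py | get_alphabet_value
-- ===== SOURCE A (Python) =====
-- import string
--
-- def get_alphabet_value(letter):
--     num_value = 0
--     counter = 11
--     for alphabet in list(string.ascii_lowercase):
--         if letter.lower() == alphabet:
--             num_value = counter
--             return num_value
--         counter += 1
-- ===== SOURCE B (Python) =====
-- def get_alphabet_value(letter):
--     c = letter.lower()
--     if len(c) == 1 and 'a' <= c <= 'z':
--         return 11 + ord(c) - ord('a')
-- ===== Notes on version B (the rewrite author's own statement) =====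
-- stated objective: simpler
-- what changed: Replaces the 26-iteration scan with a counter by a direct closed-form computation 11 + ord(c) - ord('a') guarded by a length-1 and 'a'<=c<='z' check.
import Mathlib
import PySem

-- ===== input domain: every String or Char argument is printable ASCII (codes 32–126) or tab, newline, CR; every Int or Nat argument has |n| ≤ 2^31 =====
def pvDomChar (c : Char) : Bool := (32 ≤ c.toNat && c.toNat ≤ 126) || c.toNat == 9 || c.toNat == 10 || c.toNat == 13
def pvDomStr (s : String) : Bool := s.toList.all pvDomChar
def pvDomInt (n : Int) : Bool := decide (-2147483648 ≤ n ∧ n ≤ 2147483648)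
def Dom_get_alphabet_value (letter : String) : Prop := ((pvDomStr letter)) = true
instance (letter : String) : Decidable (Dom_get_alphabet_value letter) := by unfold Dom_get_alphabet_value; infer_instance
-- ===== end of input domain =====

-- B replaces A's scan over the 26 lowercase letters with a running counter by a direct guarded arithmetic computation 11 + (ord(c) - ord('a')).

-- ===== PORT A =====
-- list(string.ascii_lowercase)
def pvAsciiLowercase : List Char :=
  ['a', 'b', 'c', 'd', 'e', 'f', 'g', 'h', 'i', 'j', 'k', 'l', 'm',
   'n', 'o', 'p', 'q', 'r', 's', 't', 'u', 'v', 'w', 'x', 'y', 'z']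

-- the for-loop: returns counter at the first alphabet char equal to letter.lower(), else falls through to None
def pvLoopA (lw : List Char) : Int → List Char → Option Int
  | _, [] => none
  | counter, c :: rest => if lw = [c] then some counter else pvLoopA lw (counter + 1) rest

def get_alphabet_value (letter : String) : Option Int :=
  pvLoopA (PySem.Str.lower letter).toList 11 pvAsciiLowercase

-- ===== PORT B =====
def get_alphabet_value_alt (letter : String) : Option Int :=
  match (PySem.Str.lower letter).toList with
  | [c] => if 'a' ≤ c ∧ c ≤ 'z' then some (11 + ((c.toNat : Int) - ('a'.toNat : Int))) else none
  | _ => none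

-- ===== PRECONDITION & SPEC =====
def Spec_get_alphabet_value (letter : String) (out : Option Int) : Prop := out = get_alphabet_value_alt letter
instance (letter : String) (out : Option Int) : Decidable (Spec_get_alphabet_value letter out) := by unfold Spec_get_alphabet_value; infer_instance

-- ===== CLAIM (what is proved, stated in full; the proofs are below) =====
def Claim_equal_get_alphabet_value : Prop := ∀ (letter : String), Dom_get_alphabet_value letter → Spec_get_alphabet_value letter (get_alphabet_value letter)

-- ===== LEMMAS AND PROOFS =====

def pvIsRun : Nat → List Char → Bool
  | _, [] => true
  | base, c :: rest => c.toNat == base && pvIsRun (base + 1) rest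

theorem char_le_iff (a b : Char) : a ≤ b ↔ a.toNat ≤ b.toNat := by
  rw [Char.le_def, UInt32.le_iff_toNat_le]
  exact Iff.rfl

theorem char_eq_iff (a b : Char) : a = b ↔ a.toNat = b.toNat := by
  constructor
  · intro h; rw [h]
  · intro h; exact Char.ext (UInt32.toNat_inj.mp h)

theorem loop_none (c : Char) (cs : List Char) (k : Int)
    (h : ∀ x ∈ cs, c ≠ x) : pvLoopA [c] k cs = none := by
  induction cs generalizing k with
  | nil => rfl
  | cons x rest ih =>
    have hx : c ≠ x := h x (List.mem_cons_self)
    simp only [pvLoopA, List.cons.injEq, and_true, if_neg hx]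
    exact ih (k + 1) (fun y hy => h y (List.mem_cons_of_mem _ hy))

theorem loop_no_single (lw : List Char) (cs : List Char) (k : Int)
    (h : ∀ c : Char, lw ≠ [c]) : pvLoopA lw k cs = none := by
  induction cs generalizing k with
  | nil => rfl
  | cons x rest ih =>
    simp only [pvLoopA, if_neg (h x)]
    exact ih (k + 1)

theorem loop_run (cs : List Char) (base : Nat) (k : Int) (c : Char)
    (hrun : pvIsRun base cs = true)
    (hlo : base ≤ c.toNat) (hhi : c.toNat < base + cs.length) :
    pvLoopA [c] k cs = some (k + ((c.toNat : Int) - (base : Int))) := by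
  induction cs generalizing base k with
  | nil => simp at hhi; omega
  | cons x rest ih =>
    simp only [List.length_cons] at hhi
    simp only [pvIsRun, Bool.and_eq_true, beq_iff_eq] at hrun
    obtain ⟨hx, hrest⟩ := hrun
    by_cases hc : c.toNat = base
    · have hcx : c = x := (char_eq_iff c x).mpr (by omega)
      simp only [pvLoopA, List.cons.injEq, and_true, if_pos hcx]
      congr 1
      omega
    · have hne : c ≠ x := fun hh => hc (by rw [(char_eq_iff c x).mp hh]; omega)
      simp only [pvLoopA, List.cons.injEq, and_true, if_neg hne]
      rw [ih (base + 1) (k + 1) hrest (by omega) (by omega)]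
      congr 1
      push_cast
      ring

theorem key_single (c : Char) :
    pvLoopA [c] 11 pvAsciiLowercase =
      if 'a' ≤ c ∧ c ≤ 'z' then some (11 + ((c.toNat : Int) - ('a'.toNat : Int))) else none := by
  by_cases hr : 'a' ≤ c ∧ c ≤ 'z'
  · rw [if_pos hr]
    have hlo : 97 ≤ c.toNat := (char_le_iff 'a' c).mp hr.1
    have hhi : c.toNat ≤ 122 := (char_le_iff c 'z').mp hr.2
    rw [loop_run pvAsciiLowercase 97 11 c (by decide) hlo (by simp [pvAsciiLowercase]; omega)]
    rfl
  · rw [if_neg hr]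
    apply loop_none
    intro x hx hcx
    have hrange : 97 ≤ x.toNat ∧ x.toNat ≤ 122 := by
      fin_cases hx <;> decide
    apply hr
    rw [hcx]
    have hA : 'a'.toNat = 97 := by decide
    have hZ : 'z'.toNat = 122 := by decide
    exact ⟨(char_le_iff 'a' x).mpr (by omega), (char_le_iff x 'z').mpr (by omega)⟩

-- ===== VERDICT (by name: the statement is the Claim_ definition above) =====
theorem get_alphabet_value_spec : Claim_equal_get_alphabet_value := by
  intro letter _
  unfold Spec_get_alphabet_value get_alphabet_value get_alphabet_value_alt
  match h : (PySem.Str.lower letter).toList with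
  | [] => exact loop_no_single [] pvAsciiLowercase 11 (fun c => by simp)
  | [c] => exact key_single c
  | c1 :: c2 :: rest => exact loop_no_single _ pvAsciiLowercase 11 (fun c => by simp)
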